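-- pv_equiv track=rewrite | github.com/cometadata/extract-software-repos | src/extract_software_repos/fast_validation.py | deduplicate_urls
-- ===== SOURCE A (Python) =====
-- from typing import Any, Callable, Dict, List, Optional, Set, Tuple
--
-- def deduplicate_urls(
--     records: List[Dict[str, Any]],
-- ) -> Tuple[List[str], Dict[str, List[int]]]:
--     """Extract unique URLs and track which records they appear in.
--
--     Args:
--         records: List of enrichment records
--
--     Returns:
--         (unique_urls, url_to_record_indices) tuple
--     """
--     unique_urls: List[str] = []
--     seen: Set[str] = set()
--     url_to_records: Dict[str, List[int]] = {}
--
--     for i, record in enumerate(records):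
--         url = record.get("enrichedValue", {}).get("relatedIdentifier")
--         if not url:
--             continue
--
--         if url not in seen:
--             seen.add(url)
--             unique_urls.append(url)
--             url_to_records[url] = []
--
--         url_to_records[url].append(i)
--
--     return unique_urls, url_to_records
-- ===== SOURCE B (Python) =====
-- def deduplicate_urls(records):
--     """Extract unique URLs and track which records they appear in.
--
--     Staged passes instead of A's single incremental loop:
--       1. project the records to a flat (url, index) pair list,
--       2. dedup the urls with dict.fromkeys (first-seen order),
--       3. group by brute force: for each unique url, scan the pair list.
--     """
--     pairs = []
--     for i, record in enumerate(records):
--         url = record.get("enrichedValue", {}).get("relatedIdentifier")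
--         if url:
--             pairs.append((url, i))
--     unique_urls = list(dict.fromkeys(u for u, _ in pairs))
--     return unique_urls, {u: [i for v, i in pairs if v == u] for u in unique_urls}
-- ===== Notes on version B (the rewrite author's own statement) =====
-- stated objective: alternative
-- what changed: B replaces A's single incremental loop over three accumulators (unique list, seen set, growing dict) by staged passes: project to a flat (url, index) pair list, dedup urls with dict.fromkeys, then group by brute-force per-url scans of the pair list.
import Mathlib
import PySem

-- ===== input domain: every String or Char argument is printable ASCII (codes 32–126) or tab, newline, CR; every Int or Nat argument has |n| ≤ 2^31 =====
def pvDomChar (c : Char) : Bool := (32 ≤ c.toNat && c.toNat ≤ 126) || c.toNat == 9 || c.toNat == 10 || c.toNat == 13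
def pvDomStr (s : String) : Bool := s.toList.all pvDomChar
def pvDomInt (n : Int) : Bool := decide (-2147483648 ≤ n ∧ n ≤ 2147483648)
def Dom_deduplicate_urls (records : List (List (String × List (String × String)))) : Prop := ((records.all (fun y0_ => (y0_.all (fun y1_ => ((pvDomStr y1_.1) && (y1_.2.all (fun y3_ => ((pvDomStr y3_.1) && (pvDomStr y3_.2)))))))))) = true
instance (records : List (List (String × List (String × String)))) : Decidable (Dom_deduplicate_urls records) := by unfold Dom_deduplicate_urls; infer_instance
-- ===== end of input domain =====

-- B replaces A's single incremental loop (unique list + seen set + growing dict) by staged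
-- passes: a flat (url, index) pair list, dict.fromkeys dedup, then brute-force per-url grouping
-- scans (objective: alternative; B is quadratic in the number of unique urls, not faster).

-- record.get("enrichedValue", {}).get("relatedIdentifier")  (assoc-list dict, first match)
def pvGetUrl (record : List (String × List (String × String))) : Option String :=
  ((((record.find? (fun p => p.1 == "enrichedValue")).map (·.2)).getD []).find?
      (fun p => p.1 == "relatedIdentifier")).map (·.2)

-- ===== PORT A =====
-- loop body of A over state (unique_urls, seen, url_to_records)
def pvStepA (st : List String × PySem.Set String × PySem.Dict String (List Int))
    (p : Int × List (String × List (String × String))) :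
    List String × PySem.Set String × PySem.Dict String (List Int) :=
  match pvGetUrl p.2 with
  | none => st
  | some url =>
    if url = "" then st
    else
      let st' := if PySem.Set.contains st.2.1 url then st
                 else (st.1 ++ [url], PySem.Set.add st.2.1 url, st.2.2.insert url [])
      (st'.1, st'.2.1, st'.2.2.modify url [] (fun l => l ++ [p.1]))

def deduplicate_urls (records : List (List (String × List (String × String)))) :
    List String × (List (String × List Int)) :=
  let st := (PySem.List.enumerate records 0).foldl pvStepA
    ([], PySem.Set.empty, PySem.Dict.empty)
  (st.1, st.2.2.items)

-- ===== PORT B =====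
-- pass 1: the (url, i) pair list
def pvPairs (l : List (Int × List (String × List (String × String)))) : List (String × Int) :=
  l.filterMap (fun p =>
    match pvGetUrl p.2 with
    | none => none
    | some u => if u = "" then none else some (u, p.1))

def deduplicate_urls_alt (records : List (List (String × List (String × String)))) :
    List String × (List (String × List Int)) :=
  let pairs := pvPairs (PySem.List.enumerate records 0)
  let unique_urls := PySem.List.dedup (pairs.map (·.1))
  (unique_urls,
   unique_urls.map (fun u => (u, (pairs.filter (fun q => q.1 == u)).map (·.2))))

-- ===== PRECONDITION & SPEC =====
def Spec_deduplicate_urls (records : List (List (String × List (String × String)))) (out : List String × (List (String × List Int))) : Prop := out = deduplicate_urls_alt records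
instance (records : List (List (String × List (String × String)))) (out : List String × (List (String × List Int))) : Decidable (Spec_deduplicate_urls records out) := by unfold Spec_deduplicate_urls; infer_instance

-- ===== CLAIM (what is proved, stated in full; the proofs are below) =====
def Claim_equal_deduplicate_urls : Prop := ∀ (records : List (List (String × List (String × String)))), Dom_deduplicate_urls records → Spec_deduplicate_urls records (deduplicate_urls records)

-- ===== LEMMAS AND PROOFS =====

-- loop invariant: A's final unique list is the Set.update of the pending pair urls, its dict's
-- keys follow that list, and each dict entry is the brute-force filter of the pending pairs
lemma pv_loopA (l : List (Int × List (String × List (String × String))))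
    (us : List String) (seen : PySem.Set String) (d : PySem.Dict String (List Int))
    (hs : ∀ u, PySem.Set.contains seen u = d.contains u)
    (hk : d.keys = us) :
    (l.foldl pvStepA (us, seen, d)).1 = PySem.Set.update us ((pvPairs l).map (·.1)) ∧
    (l.foldl pvStepA (us, seen, d)).2.2.keys = (l.foldl pvStepA (us, seen, d)).1 ∧
    (∀ u, (l.foldl pvStepA (us, seen, d)).2.2.getD u []
        = d.getD u [] ++ ((pvPairs l).filter (fun q => q.1 == u)).map (·.2)) := by
  induction l generalizing us seen d with
  | nil => exact ⟨rfl, hk, fun u => by simp [pvPairs]⟩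
  | cons p rest ih =>
    simp only [List.foldl_cons]
    rcases hurl : pvGetUrl p.2 with _ | url
    · simpa only [pvStepA, hurl, pvPairs, List.filterMap_cons, List.filter_nil] using
        ih us seen d hs hk
    · by_cases he : url = ""
      · simpa only [pvStepA, hurl, if_pos he, pvPairs, List.filterMap_cons, he] using
          ih us seen d hs hk
      · have hpairs : pvPairs (p :: rest) = (url, p.1) :: pvPairs rest := by
          simp [pvPairs, hurl, he]
        by_cases hc : d.contains url = true
        · have hsc : PySem.Set.contains seen url = true := by rw [hs]; exact hc
          have hmem : url ∈ us := by
            rw [← hk]; exact (PySem.Dict.contains_iff_mem_keys d url).mp hc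
          simp only [pvStepA, hurl, if_neg he, hsc, if_true]
          obtain ⟨h1, h2, h3⟩ := ih us seen (d.modify url [] (fun l => l ++ [p.1]))
            (fun u => by
              rw [hs u, PySem.Dict.contains_modify]
              by_cases hu : u = url <;> simp [hu, hc])
            (by rw [PySem.Dict.keys_modify,
                  PySem.Dict.keys_insert_of_contains d _ hc]; exact hk)
          refine ⟨?_, h2, ?_⟩
          · rw [h1, hpairs]
            simp [PySem.Set.update_cons, PySem.Set.add_of_mem hmem]
          · intro u
            rw [h3 u, hpairs, PySem.Dict.getD_modify]
            by_cases hu : u = url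
            · subst hu; simp
            · rw [if_neg hu, List.filter_cons]
              simp [Ne.symm hu]
        · have hc' : d.contains url = false := by simpa using hc
          have hsc : PySem.Set.contains seen url = false := by rw [hs]; exact hc'
          have hnotmem : url ∉ seen := by
            simpa [PySem.Set.contains, List.contains_eq_mem] using hsc
          have hmem : url ∉ us := by
            rw [← hk]
            exact fun h => by simp [(PySem.Dict.contains_iff_mem_keys d url).mpr h] at hc'
          simp only [pvStepA, hurl, if_neg he, hsc, Bool.false_eq_true, if_false]
          obtain ⟨h1, h2, h3⟩ := ih (us ++ [url]) (PySem.Set.add seen url)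
            ((d.insert url []).modify url [] (fun l => l ++ [p.1]))
            (fun u => by
              rw [PySem.Set.add_of_not_mem hnotmem, PySem.Dict.contains_modify,
                PySem.Dict.contains_insert]
              by_cases hu : u = url
              · subst hu; simp [PySem.Set.contains, List.contains_eq_mem]
              · simp [PySem.Set.contains, List.contains_eq_mem, hu, ← hs u])
            (by
              rw [PySem.Dict.keys_modify, PySem.Dict.insert_insert_self,
                PySem.Dict.keys_insert_of_not_contains d _ hc', hk])
          refine ⟨?_, h2, ?_⟩
          · rw [h1, hpairs]
            simp [PySem.Set.update_cons, PySem.Set.add_of_not_mem hmem]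
          · intro u
            rw [h3 u, hpairs]
            by_cases hu : u = url
            · subst hu
              rw [PySem.Dict.getD_modify_self, PySem.Dict.getD_insert_self,
                PySem.Dict.getD_of_not_contains d _ hc']
              simp
            · rw [PySem.Dict.getD_modify_of_ne _ _ _ hu,
                PySem.Dict.getD_insert_of_ne _ _ _ hu, List.filter_cons]
              simp [Ne.symm hu]

-- ===== VERDICT (by name: the statement is the Claim_ definition above) =====
theorem deduplicate_urls_spec : Claim_equal_deduplicate_urls := by
  intro records _
  unfold Spec_deduplicate_urls deduplicate_urls deduplicate_urls_alt
  obtain ⟨h1, h2, h3⟩ := pv_loopA (PySem.List.enumerate records 0) [] PySem.Set.empty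
    PySem.Dict.empty (fun u => by simp [PySem.Set.contains, PySem.Set.empty,
      PySem.Dict.contains_empty]) (by simp [PySem.Dict.keys_empty])
  have hnd : ((PySem.List.enumerate records 0).foldl pvStepA
      ([], PySem.Set.empty, PySem.Dict.empty)).2.2.keys.Nodup := by
    rw [h2, h1]; exact PySem.Set.nodup_update _ _ (List.nodup_nil)
  have hitems := PySem.Dict.items_eq_map_keys _ hnd ([] : List Int)
  rw [Prod.mk.injEq]
  constructor
  · rw [h1]; simp [PySem.List.dedup_eq_ofList, PySem.Set.ofList_eq_foldl, PySem.Set.update]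
  · rw [hitems, h2, h1]
    simp only [PySem.List.dedup_eq_ofList, PySem.Set.ofList_eq_foldl, PySem.Set.update]
    apply List.map_congr_left
    intro u _
    rw [h3 u]
    simp [PySem.Dict.getD_empty]
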